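-- pv_equiv track=rewrite | github.com/derberg/orkasai | custom_tools.py | _analyze_generic_code
-- ===== SOURCE A (Python) =====
-- def _analyze_generic_code(code: str, language: str) -> str:
--     """Analyze code for non-Python languages."""
--     lines = code.split('\n')
--     analysis = []
--
--     analysis.append(f"📊 General Code Analysis ({language}):")
--     analysis.append(f"   • Total lines: {len(lines)}")
--     analysis.append(f"   • Non-empty lines: {len([l for l in lines if l.strip()])}")
--     analysis.append(f"   • Comment lines: {len([l for l in lines if l.strip().startswith(('//','#','/*','*'))])}")
--
--     # Basic pattern detection
--     patterns = {
--         'function_keywords': ['function', 'def', 'func', 'method', 'procedure'],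
--         'class_keywords': ['class', 'interface', 'struct'],
--         'control_flow': ['if', 'else', 'while', 'for', 'switch', 'case']
--     }
--
--     analysis.append(f"\n🔍 Pattern Detection:")
--     for pattern_type, keywords in patterns.items():
--         count = sum(1 for line in lines for keyword in keywords if keyword in line.lower())
--         analysis.append(f"   • {pattern_type.replace('_', ' ').title()}: {count}")
--
--     return "\n".join(analysis)
-- ===== SOURCE B (Python) =====
-- def _analyze_generic_code(code: str, language: str) -> str:
--     """Analyze code for non-Python languages (single pass over the lines)."""
--     lines = code.split('\n')
--     non_empty = comments = fn_count = cls_count = cf_count = 0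
--     for line in lines:
--         stripped = line.strip()
--         if stripped:
--             non_empty += 1
--         if stripped.startswith(('//', '#', '/*', '*')):
--             comments += 1
--         low = line.lower()
--         for kw in ('function', 'def', 'func', 'method', 'procedure'):
--             if kw in low:
--                 fn_count += 1
--         for kw in ('class', 'interface', 'struct'):
--             if kw in low:
--                 cls_count += 1
--         for kw in ('if', 'else', 'while', 'for', 'switch', 'case'):
--             if kw in low:
--                 cf_count += 1
--     return "\n".join([
--         f"📊 General Code Analysis ({language}):",
--         f"   • Total lines: {len(lines)}",
--         f"   • Non-empty lines: {non_empty}",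
--         f"   • Comment lines: {comments}",
--         "\n🔍 Pattern Detection:",
--         f"   • Function Keywords: {fn_count}",
--         f"   • Class Keywords: {cls_count}",
--         f"   • Control Flow: {cf_count}",
--     ])
-- ===== Notes on version B (the rewrite author's own statement) =====
-- stated objective: alternative
-- what changed: A traverses the line list five times (two filter comprehensions plus one nested-sum pass per pattern group); B makes a single pass over the lines maintaining five counters (non-empty, comments, and one per pattern group) and emits the report from the accumulated counters with the titles precomputed.
import Mathlib
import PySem

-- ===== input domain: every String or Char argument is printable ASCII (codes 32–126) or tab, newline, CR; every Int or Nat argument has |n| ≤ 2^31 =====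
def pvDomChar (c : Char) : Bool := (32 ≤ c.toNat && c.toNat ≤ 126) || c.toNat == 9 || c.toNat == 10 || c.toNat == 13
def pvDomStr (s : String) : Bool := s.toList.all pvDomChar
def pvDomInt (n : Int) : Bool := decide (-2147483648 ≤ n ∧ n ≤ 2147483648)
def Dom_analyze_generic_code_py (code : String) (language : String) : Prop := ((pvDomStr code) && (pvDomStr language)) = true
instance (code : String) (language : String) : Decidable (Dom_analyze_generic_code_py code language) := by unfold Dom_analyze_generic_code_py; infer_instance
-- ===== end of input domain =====

-- B rewrites A's five traversals of the lines (two filters + a nested sum per pattern group)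
-- as one pass maintaining five counters; same output, 'alternative' objective, no speed claim.

-- ===== PORT A =====
-- shared data: the comment-prefix tuple and the patterns dict of A (B uses the same literals)
def pyCommentStart (s : String) : Bool :=
  PySem.Str.startswith s "//" || PySem.Str.startswith s "#" ||
  PySem.Str.startswith s "/*" || PySem.Str.startswith s "*"

def fnKws : List String := ["function", "def", "func", "method", "procedure"]
def clsKws : List String := ["class", "interface", "struct"]
def cfKws : List String := ["if", "else", "while", "for", "switch", "case"]

def aPatterns : List (String × List String) :=
  [("function_keywords", fnKws), ("class_keywords", clsKws), ("control_flow", cfKws)]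

-- str.title() for the ASCII domain: uppercase a letter after a non-letter, lowercase otherwise
def pyTitleAux : List Char → Bool → List Char
  | [], _ => []
  | c :: rest, prevAlpha =>
    (if prevAlpha then PySem.Chars.lowerChar c else PySem.Chars.upperChar c) ::
      pyTitleAux rest (PySem.Chars.isalpha c)

def pyTitle (s : String) : String := String.ofList (pyTitleAux s.toList false)

def analyze_generic_code_py (code : String) (language : String) : String :=
  let lines := (PySem.Str.split? code "\n").getD []
  let analysis : List String := []
  let analysis := analysis ++ ["📊 General Code Analysis (" ++ language ++ "):"]
  let analysis := analysis ++ ["   • Total lines: " ++ PySem.Int.toStr (Int.ofNat lines.length)]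
  let analysis := analysis ++ ["   • Non-empty lines: " ++
    PySem.Int.toStr (Int.ofNat (lines.filter (fun l => !(PySem.Str.strip l == ""))).length)]
  let analysis := analysis ++ ["   • Comment lines: " ++
    PySem.Int.toStr (Int.ofNat (lines.filter (fun l => pyCommentStart (PySem.Str.strip l))).length)]
  let analysis := analysis ++ ["\n🔍 Pattern Detection:"]
  let analysis := aPatterns.foldl (fun acc p =>
    let count := lines.foldl (fun s line =>
      s + (p.2).foldl (fun t kw => if PySem.Str.isIn kw (PySem.Str.lower line) then t + 1 else t) 0) 0
    acc ++ ["   • " ++ pyTitle (PySem.Str.replace p.1 "_" " ") ++ ": " ++ PySem.Int.toStr (Int.ofNat count)]) analysis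
  PySem.Str.join "\n" analysis

-- ===== PORT B =====
-- one pass over the lines: (non_empty, comments, fn_count, cls_count, cf_count)
def bStep (acc : Nat × Nat × Nat × Nat × Nat) (line : String) : Nat × Nat × Nat × Nat × Nat :=
  let stripped := PySem.Str.strip line
  let ne := if !(stripped == "") then acc.1 + 1 else acc.1
  let cm := if pyCommentStart stripped then acc.2.1 + 1 else acc.2.1
  let low := PySem.Str.lower line
  let fn := fnKws.foldl (fun c kw => if PySem.Str.isIn kw low then c + 1 else c) acc.2.2.1
  let cl := clsKws.foldl (fun c kw => if PySem.Str.isIn kw low then c + 1 else c) acc.2.2.2.1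
  let cf := cfKws.foldl (fun c kw => if PySem.Str.isIn kw low then c + 1 else c) acc.2.2.2.2
  (ne, cm, fn, cl, cf)

def analyze_generic_code_py_alt (code : String) (language : String) : String :=
  let lines := (PySem.Str.split? code "\n").getD []
  let acc := lines.foldl bStep (0, 0, 0, 0, 0)
  PySem.Str.join "\n"
    ["📊 General Code Analysis (" ++ language ++ "):",
     "   • Total lines: " ++ PySem.Int.toStr (Int.ofNat lines.length),
     "   • Non-empty lines: " ++ PySem.Int.toStr (Int.ofNat acc.1),
     "   • Comment lines: " ++ PySem.Int.toStr (Int.ofNat acc.2.1),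
     "\n🔍 Pattern Detection:",
     "   • Function Keywords: " ++ PySem.Int.toStr (Int.ofNat acc.2.2.1),
     "   • Class Keywords: " ++ PySem.Int.toStr (Int.ofNat acc.2.2.2.1),
     "   • Control Flow: " ++ PySem.Int.toStr (Int.ofNat acc.2.2.2.2)]

-- ===== PRECONDITION & SPEC =====
def Spec_analyze_generic_code_py (code : String) (language : String) (out : String) : Prop := out = analyze_generic_code_py_alt code language
instance (code : String) (language : String) (out : String) : Decidable (Spec_analyze_generic_code_py code language out) := by unfold Spec_analyze_generic_code_py; infer_instance

-- ===== CLAIM (what is proved, stated in full; the proofs are below) =====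
def Claim_equal_analyze_generic_code_py : Prop := ∀ (code : String) (language : String), Dom_analyze_generic_code_py code language → Spec_analyze_generic_code_py code language (analyze_generic_code_py code language)

-- ===== LEMMAS AND PROOFS =====

-- counting fold with an arbitrary start
theorem foldl_count {α : Type} (p : α → Bool) (l : List α) (n : Nat) :
    l.foldl (fun t x => if p x then t + 1 else t) n = n + l.countP p := by
  induction l generalizing n with
  | nil => simp
  | cons a l ih =>
    by_cases h : p a
    · simp [h, ih]; omega
    · simp [h, ih]

-- summing fold with an arbitrary start
theorem foldl_sum {α : Type} (g : α → Nat) (l : List α) (n : Nat) :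
    l.foldl (fun s x => s + g x) n = n + (l.map g).sum := by
  induction l generalizing n with
  | nil => simp
  | cons a l ih => simp [ih]; omega

def kwCount (kws : List String) (line : String) : Nat :=
  kws.countP (fun kw => PySem.Str.isIn kw (PySem.Str.lower line))

-- B's single pass equals A's five traversals, componentwise
theorem bStep_fold (lines : List String) (a b c d e : Nat) :
    lines.foldl bStep (a, b, c, d, e) =
      (a + (lines.filter (fun l => !(PySem.Str.strip l == ""))).length,
       b + (lines.filter (fun l => pyCommentStart (PySem.Str.strip l))).length,
       c + (lines.map (kwCount fnKws)).sum,
       d + (lines.map (kwCount clsKws)).sum,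
       e + (lines.map (kwCount cfKws)).sum) := by
  induction lines generalizing a b c d e with
  | nil => simp
  | cons line rest ih =>
    simp only [List.foldl_cons, bStep, foldl_count, List.filter_cons, List.map_cons, List.sum_cons]
    rw [ih]
    by_cases h1 : (PySem.Str.strip line == "") <;>
      by_cases h2 : pyCommentStart (PySem.Str.strip line) <;>
        simp [h1, h2, kwCount] <;> omega

theorem per_line_sum (kws : List String) (lines : List String) :
    lines.foldl (fun s line =>
      s + kws.foldl (fun t kw => if PySem.Str.isIn kw (PySem.Str.lower line) then t + 1 else t) 0) 0
    = (lines.map (kwCount kws)).sum := by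
  rw [foldl_sum (fun line => kws.foldl (fun t kw => if PySem.Str.isIn kw (PySem.Str.lower line) then t + 1 else t) 0)]
  simp only [Nat.zero_add]
  congr 1
  apply List.map_congr_left
  intro line _
  rw [foldl_count]
  simp [kwCount]

set_option maxHeartbeats 1000000 in
theorem title_fn : pyTitle (PySem.Str.replace "function_keywords" "_" " ") = "Function Keywords" := by decide

set_option maxHeartbeats 1000000 in
theorem title_cls : pyTitle (PySem.Str.replace "class_keywords" "_" " ") = "Class Keywords" := by decide

set_option maxHeartbeats 1000000 in
theorem title_cf : pyTitle (PySem.Str.replace "control_flow" "_" " ") = "Control Flow" := by decide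

-- ===== VERDICT (by name: the statement is the Claim_ definition above) =====
theorem analyze_generic_code_py_spec : Claim_equal_analyze_generic_code_py := by
  intro code language _
  unfold Spec_analyze_generic_code_py analyze_generic_code_py analyze_generic_code_py_alt
  simp only [aPatterns, List.foldl_cons, List.foldl_nil, bStep_fold, per_line_sum,
    Nat.zero_add, title_fn, title_cls, title_cf, List.nil_append, List.cons_append]
  rfl
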